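-- pv_equiv track=rewrite | github.com/larturi/python-labs | labs/max_difference.py | maximaDiferencia
-- ===== SOURCE A (Python) =====
-- def maximaDiferencia(a):
--
--     diff = -1
--
--     large = len(a)
--
--     if large == 0:
--         return diff
--
--     for x in range(large - 1):
--         for y in range(x+1, large):
--             if a[y] > a[x]:
--                 diff = max(diff, a[y] - a[x])
--
--     return diff
-- ===== SOURCE B (Python) =====
-- def maximaDiferencia(a):
--     diff = -1
--     mn = None
--     for v in a:
--         if mn is not None and mn < v:
--             diff = max(diff, v - mn)
--         if mn is None or v < mn:
--             mn = v
--     return diff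
-- ===== Notes on version B (the rewrite author's own statement) =====
-- stated objective: faster
-- what changed: Replaced the nested all-pairs scan by a single pass that keeps the running minimum and the best positive difference so far.
import Mathlib
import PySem

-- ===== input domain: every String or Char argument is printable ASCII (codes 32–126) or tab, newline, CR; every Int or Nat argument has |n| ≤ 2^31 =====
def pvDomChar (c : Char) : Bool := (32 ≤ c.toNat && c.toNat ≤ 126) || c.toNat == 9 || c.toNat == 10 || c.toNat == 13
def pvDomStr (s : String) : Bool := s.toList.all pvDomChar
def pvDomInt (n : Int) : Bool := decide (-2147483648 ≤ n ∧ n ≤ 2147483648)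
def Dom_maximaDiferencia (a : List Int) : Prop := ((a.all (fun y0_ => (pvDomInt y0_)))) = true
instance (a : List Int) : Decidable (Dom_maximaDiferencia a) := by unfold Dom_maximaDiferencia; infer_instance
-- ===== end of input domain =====

-- B replaces A's O(n^2) all-pairs scan by one pass tracking the running minimum (objective: faster).

-- ===== PORT A =====
-- indices produced by the ranges are always in bounds, so pyGetD with default 0 is exact here
def maximaDiferencia (a : List Int) : Int :=
  let diff : Int := -1
  let large : Int := (a.length : Int)
  if large == 0 then diff
  else
    (PySem.List.pyRange 0 (large - 1) 1).foldl
      (fun diff x =>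
        (PySem.List.pyRange (x + 1) large 1).foldl
          (fun diff y =>
            if PySem.List.pyGetD a y 0 > PySem.List.pyGetD a x 0 then
              max diff (PySem.List.pyGetD a y 0 - PySem.List.pyGetD a x 0)
            else diff)
          diff)
      diff

-- ===== PORT B =====
def maximaDiferencia_alt (a : List Int) : Int :=
  (a.foldl
    (fun (s : Int × Option Int) v =>
      ((match s.2 with
        | some m => if m < v then max s.1 (v - m) else s.1
        | none => s.1),
       (match s.2 with
        | some m => if v < m then some v else some m
        | none => some v)))
    (-1, none)).1

-- ===== PRECONDITION & SPEC =====
def Spec_maximaDiferencia (a : List Int) (out : Int) : Prop := out = maximaDiferencia_alt a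
instance (a : List Int) (out : Int) : Decidable (Spec_maximaDiferencia a out) := by unfold Spec_maximaDiferencia; infer_instance

-- ===== CLAIM (what is proved, stated in full; the proofs are below) =====
def Claim_equal_maximaDiferencia : Prop := ∀ (a : List Int), Dom_maximaDiferencia a → Spec_maximaDiferencia a (maximaDiferencia a)

-- ===== LEMMAS AND PROOFS =====

-- scan of `t` against a fixed pivot `x` (A's inner loop, structurally)
def pvInner (x : Int) (t : List Int) (d : Int) : Int :=
  t.foldl (fun d w => if x < w then max d (w - x) else d) d

-- A's whole loop nest, structurally: pivot on the head, then recurse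
def pvA2 (d : Int) : List Int → Int
  | [] => d
  | v :: rest => pvA2 (pvInner v rest d) rest

theorem pvInner_cons (x r : Int) (s : List Int) (d : Int) :
    pvInner x (r :: s) d = pvInner x s (if x < r then max d (r - x) else d) := rfl

theorem pvInner_max (x : Int) (t : List Int) : ∀ d c, pvInner x t (max d c) = max (pvInner x t d) c := by
  induction t with
  | nil => intro d c; simp [pvInner]
  | cons r s ih =>
    intro d c
    rw [pvInner_cons, pvInner_cons]
    split_ifs with h
    · rw [show max (max d c) (r - x) = max (max d (r - x)) c by omega]; exact ih _ _
    · exact ih _ _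

-- scanning against both m and w is scanning against their minimum
theorem pvInner_inner (m w : Int) (t : List Int) :
    ∀ d, pvInner w t (pvInner m t d) = pvInner (min m w) t d := by
  induction t with
  | nil => intro d; simp [pvInner]
  | cons r s ih =>
    intro d
    rw [pvInner_cons m, pvInner_cons w, pvInner_cons (min m w)]
    by_cases hw : w < r
    · rw [if_pos hw, ← pvInner_max m s, ih]
      congr 1
      split_ifs <;> omega
    · rw [if_neg hw, ih]
      congr 1
      split_ifs <;> omega

-- B's fold, once the minimum exists, is A's loop nest with the minimum as an extra head
theorem pvB_some (t : List Int) : ∀ d m,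
    (t.foldl
      (fun (s : Int × Option Int) v =>
        ((match s.2 with
          | some m => if m < v then max s.1 (v - m) else s.1
          | none => s.1),
         (match s.2 with
          | some m => if v < m then some v else some m
          | none => some v)))
      (d, some m)).1 = pvA2 d (m :: t) := by
  induction t with
  | nil => intro d m; simp [pvA2, pvInner]
  | cons w s ih =>
    intro d m
    show (s.foldl _ ((if m < w then max d (w - m) else d),
        (if w < m then some w else some m))).1 = _
    have hmin : (if w < m then some w else some m) = some (min m w) := by
      split_ifs with h
      · congr 1; omega
      · congr 1; omega
    rw [hmin, ih]
    show pvA2 _ (min m w :: s) = pvA2 d (m :: w :: s)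
    simp only [pvA2]
    congr 1
    rw [pvInner_cons m w, pvInner_inner]

theorem pvAlt_eq_A2 (a : List Int) : maximaDiferencia_alt a = pvA2 (-1) a := by
  cases a with
  | nil => simp [maximaDiferencia_alt, pvA2]
  | cons v rest =>
    simp only [maximaDiferencia_alt, List.foldl_cons]
    exact pvB_some rest (-1) v

-- A's inner index loop, as pvInner over the tail after the pivot
theorem pvInnerRange (xs : List Int) (piv : Int) (j : Int) (hj : 0 ≤ j) (d : Int) :
    (PySem.List.pyRange (j + 1) ((xs.length : Int)) 1).foldl
      (fun diff y =>
        if piv < PySem.List.pyGetD xs y 0 then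
          max diff (PySem.List.pyGetD xs y 0 - piv)
        else diff) d
    = pvInner piv (xs.drop (j + 1).toNat) d := by
  have h := PySem.List.foldl_pyRange_pyGetD' xs 0
    (fun (d w : Int) => if piv < w then max d (w - piv) else d) d (a := j + 1) (by omega)
  simpa [pvInner] using h

-- A's index-based loop nest equals the structural pvA2
theorem pvA_eq_A2 (a : List Int) : ∀ d,
    (PySem.List.pyRange 0 ((a.length : Int) - 1) 1).foldl
      (fun diff x =>
        (PySem.List.pyRange (x + 1) ((a.length : Int)) 1).foldl
          (fun diff y =>
            if PySem.List.pyGetD a x 0 < PySem.List.pyGetD a y 0 then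
              max diff (PySem.List.pyGetD a y 0 - PySem.List.pyGetD a x 0)
            else diff)
          diff)
      d = pvA2 d a := by
  induction a with
  | nil => intro d; simp [pvA2, PySem.List.pyRange_one_eq_nil]
  | cons v rest ih =>
    intro d
    have hlen : ((v :: rest).length : Int) - 1 = (rest.length : Int) := by
      simp
    rw [hlen]
    by_cases hn : rest.length = 0
    · rw [hn]
      simp only [Nat.cast_zero, PySem.List.pyRange_zero]
      cases rest with
      | nil => simp [pvA2, pvInner]
      | cons _ _ => simp at hn
    · have h0 : (0 : Int) < (rest.length : Int) := by omega
      rw [PySem.List.pyRange_one_cons h0, List.foldl_cons]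
      simp only [zero_add]
      have hv : PySem.List.pyGetD (v :: rest) (0 : Int) 0 = v := by
        simp [PySem.List.pyGetD_ofNat' (v :: rest) 0 0]
      -- the x = 0 step is pvInner v rest d
      have hstep :
          (PySem.List.pyRange 1 (((v :: rest).length : Int)) 1).foldl
            (fun diff y =>
              if PySem.List.pyGetD (v :: rest) (0 : Int) 0 < PySem.List.pyGetD (v :: rest) y 0 then
                max diff (PySem.List.pyGetD (v :: rest) y 0 - PySem.List.pyGetD (v :: rest) (0 : Int) 0)
              else diff) d = pvInner v rest d := by
        rw [hv]
        have h1 := pvInnerRange (v :: rest) v 0 (by omega) d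
        simpa using h1
      rw [hstep]
      -- shift the remaining outer indices 1,…,n-1 down to 0,…,n-2 over `rest`
      have hshift :
          (PySem.List.pyRange 1 (rest.length : Int) 1).foldl
            (fun diff x =>
              (PySem.List.pyRange (x + 1) (((v :: rest).length : Int)) 1).foldl
                (fun diff y =>
                  if PySem.List.pyGetD (v :: rest) x 0 < PySem.List.pyGetD (v :: rest) y 0 then
                    max diff (PySem.List.pyGetD (v :: rest) y 0 - PySem.List.pyGetD (v :: rest) x 0)
                  else diff)
                diff)
            (pvInner v rest d)
          =
          (PySem.List.pyRange 0 ((rest.length : Int) - 1) 1).foldl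
            (fun diff x =>
              (PySem.List.pyRange (x + 1) ((rest.length : Int)) 1).foldl
                (fun diff y =>
                  if PySem.List.pyGetD rest x 0 < PySem.List.pyGetD rest y 0 then
                    max diff (PySem.List.pyGetD rest y 0 - PySem.List.pyGetD rest x 0)
                  else diff)
                diff)
            (pvInner v rest d) := by
        rw [PySem.List.pyRange_one 1 (rest.length : Int),
            PySem.List.pyRange_one 0 ((rest.length : Int) - 1)]
        rw [show ((rest.length : Int) - 1 - 0) = ((rest.length : Int) - 1) by ring]
        rw [List.foldl_map, List.foldl_map]
        apply PySem.List.foldl_congr_mem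
        intro acc k _
        simp only [zero_add]
        rw [pvInnerRange (v :: rest) (PySem.List.pyGetD (v :: rest) (1 + (k : Int)) 0)
              (1 + (k : Int)) (by omega) acc,
            pvInnerRange rest (PySem.List.pyGetD rest (k : Int) 0) (k : Int) (by omega) acc]
        have hpiv : PySem.List.pyGetD (v :: rest) (1 + (k : Int)) 0 =
            PySem.List.pyGetD rest (k : Int) 0 := by
          rw [show (1 + (k : Int)) = ((k + 1 : Nat) : Int) by push_cast; ring]
          rw [PySem.List.pyGetD_natCast, PySem.List.pyGetD_natCast]
          simp
        have hdrop : (v :: rest).drop ((1 + (k : Int)) + 1).toNat =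
            rest.drop (((k : Int)) + 1).toNat := by
          rw [show ((1 + (k : Int)) + 1).toNat = k + 2 by omega,
              show (((k : Int)) + 1).toNat = k + 1 by omega]
          rfl
        rw [hpiv, hdrop]
      rw [hshift, ih]
      simp [pvA2]

-- ===== VERDICT (by name: the statement is the Claim_ definition above) =====
theorem maximaDiferencia_spec : Claim_equal_maximaDiferencia := by
  intro a _
  show maximaDiferencia a = maximaDiferencia_alt a
  rw [pvAlt_eq_A2]
  unfold maximaDiferencia
  simp only [gt_iff_lt]
  split_ifs with h
  · cases a with
    | nil => simp [pvA2]
    | cons v rest =>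
      exfalso
      simp only [List.length_cons, beq_iff_eq] at h
      omega
  · exact pvA_eq_A2 a (-1)
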